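-- pv_equiv track=rewrite | github.com/meowpunch/meowrithm | jobs/amazon/dp.py | removeProduct
-- ===== SOURCE A (Python) =====
-- def removeProduct(num, ids, rem):
--     mem = dict()
--
--     for i in ids:
--         mem[i] = mem.get(i, 0) + 1
--
--     # sort by value
--     sortedMem = sorted(mem.items(), key=lambda x: x[1], reverse=True)
--
--     while rem > 0:
--         k, v = sortedMem.pop()
--
--         if rem - v < 0:
--             sortedMem.append((k, v))
--             break
--         else:
--             rem = rem - v
--
--     return len(sortedMem)
-- ===== SOURCE B (Python) =====
-- def removeProduct(num, ids, rem):
--     freq = {}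
--     for i in ids:
--         freq[i] = freq.get(i, 0) + 1
--     # bucket the group sizes: buckets[c] = number of distinct ids occurring exactly c times
--     buckets = {}
--     for v in freq.values():
--         buckets[v] = buckets.get(v, 0) + 1
--     removed = 0
--     for c in range(1, len(ids) + 1):
--         m = buckets.get(c, 0)
--         if m == 0:
--             continue
--         can = min(m, max(rem, 0) // c)
--         if can < m:
--             removed += can
--             break
--         removed += m
--         rem -= m * c
--     return len(freq) - removed
-- ===== Notes on version B (the rewrite author's own statement) =====
-- stated objective: alternative
-- what changed: B replaces A's sort-descending-then-pop-one-group-at-a-time loop with a counting-bucket scheme: it buckets group sizes (a histogram of frequencies), scans sizes 1..len(ids) ascending and removes whole buckets at once via integer division, avoiding the comparison sort and the per-group loop.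
import Mathlib
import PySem

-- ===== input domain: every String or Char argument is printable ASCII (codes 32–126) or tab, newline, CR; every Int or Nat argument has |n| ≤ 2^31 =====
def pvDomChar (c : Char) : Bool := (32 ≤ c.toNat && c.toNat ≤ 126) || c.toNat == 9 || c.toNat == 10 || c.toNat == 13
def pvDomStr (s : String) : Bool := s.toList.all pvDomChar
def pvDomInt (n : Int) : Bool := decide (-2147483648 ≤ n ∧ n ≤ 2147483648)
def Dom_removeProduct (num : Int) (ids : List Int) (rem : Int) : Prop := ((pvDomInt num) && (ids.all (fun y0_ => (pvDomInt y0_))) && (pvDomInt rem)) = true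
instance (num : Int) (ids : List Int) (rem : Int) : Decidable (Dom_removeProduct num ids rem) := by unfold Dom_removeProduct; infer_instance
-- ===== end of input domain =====

-- B replaces A's sort-by-frequency-then-pop loop by a counting-bucket (frequency histogram) scan; equal return values proved on Pre_ (rem ≤ len ids, where A does not raise).

-- ===== PORT A =====
-- the 'while rem > 0: k,v = sortedMem.pop(); …' loop of A (pop takes the LAST element)
def pvALoop (l : List (Int × Int)) (rem : Int) : Int :=
  if rem > 0 then
    match hl : l.getLast? with
    | none => 0  -- Python raises IndexError here (pop from an empty list); excluded by Pre_
    | some kv =>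
      if rem - kv.2 < 0 then ((l.dropLast ++ [kv]).length : Int)  -- append back, break, return len
      else pvALoop l.dropLast (rem - kv.2)
  else (l.length : Int)
termination_by l.length
decreasing_by
  have hne : l ≠ [] := by intro h; subst h; simp at hl
  have := List.length_pos_of_ne_nil hne
  simp [List.length_dropLast]; omega

def removeProduct (num : Int) (ids : List Int) (rem : Int) : Int :=
  let mem := ids.foldl (fun d i => d.insert i (d.getD i 0 + 1)) PySem.Dict.empty
  let sortedMem := PySem.List.sorted mem.items (fun x => x.2) true
  pvALoop sortedMem rem

-- ===== PORT B =====
-- B's 'for c in range(1, len(ids)+1): …' bucket loop with its break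
def pvBLoop (buckets : PySem.Dict Int Int) (cs : List Int) (removed : Int) (rem : Int) : Int :=
  match cs with
  | [] => removed
  | c :: cs' =>
    let m := buckets.getD c 0
    if m = 0 then pvBLoop buckets cs' removed rem
    else
      let can := min m (PySem.Int.floordiv (max rem 0) c)
      if can < m then removed + can
      else pvBLoop buckets cs' (removed + m) (rem - m * c)

def removeProduct_alt (num : Int) (ids : List Int) (rem : Int) : Int :=
  let freq := ids.foldl (fun d i => d.insert i (d.getD i 0 + 1)) PySem.Dict.empty
  let buckets := freq.values.foldl (fun d v => d.insert v (d.getD v 0 + 1)) PySem.Dict.empty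
  (PySem.Dict.size freq : Int) - pvBLoop buckets (PySem.List.pyRange 1 ((ids.length : Int) + 1) 1) 0 rem

-- ===== PRECONDITION & SPEC =====
-- Pre_ excludes exactly the inputs where Python A raises IndexError: rem > len(ids) (pop from empty list)
def Pre_removeProduct (num : Int) (ids : List Int) (rem : Int) : Prop := rem ≤ (ids.length : Int)
instance (num : Int) (ids : List Int) (rem : Int) : Decidable (Pre_removeProduct num ids rem) := by unfold Pre_removeProduct; infer_instance
def pvWitness_removeProduct : Int × List Int × Int := (0, [1, 1, 2], 2)

def Spec_removeProduct (num : Int) (ids : List Int) (rem : Int) (out : Int) : Prop := out = removeProduct_alt num ids rem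
instance (num : Int) (ids : List Int) (rem : Int) (out : Int) : Decidable (Spec_removeProduct num ids rem out) := by unfold Spec_removeProduct; infer_instance

-- ===== CLAIM (what is proved, stated in full; the proofs are below) =====
def Claim_equal_removeProduct : Prop := ∀ (num : Int) (ids : List Int) (rem : Int), Dom_removeProduct num ids rem → Pre_removeProduct num ids rem → Spec_removeProduct num ids rem (removeProduct num ids rem)

-- ===== LEMMAS AND PROOFS =====

-- the common greedy spine: consume values front-to-back while they fit
def pvG : List Int → Int → Int
  | [], _ => 0
  | v :: vs, rem => if rem > 0 then (if rem - v < 0 then 0 else 1 + pvG vs (rem - v)) else 0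

theorem pvALoop_eq (l : List (Int × Int)) (rem : Int) :
    pvALoop l rem = (l.length : Int) - pvG (l.reverse.map Prod.snd) rem := by
  induction l using List.reverseRecOn generalizing rem with
  | nil => rw [pvALoop]; simp [pvG]
  | append_singleton l x ih =>
    rw [pvALoop]
    by_cases h : rem > 0
    · rw [if_pos h]
      split
      next hl => simp at hl
      next kv hl =>
        rw [List.getLast?_concat] at hl
        obtain rfl : x = kv := Option.some.inj hl
        simp only [List.dropLast_concat, List.reverse_append, List.reverse_cons, List.reverse_nil,
          List.nil_append, List.cons_append, List.map_cons, pvG, if_pos h]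
        by_cases h2 : rem - x.2 < 0
        · simp [h2]
        · rw [if_neg h2, ih]
          simp only [List.length_append, List.length_cons, List.length_nil]
          push_cast
          omega
    · rw [if_neg h]
      simp only [List.reverse_append, List.reverse_cons, List.reverse_nil, List.nil_append,
        List.cons_append, List.map_cons, pvG]
      rw [if_neg h]
      simp

theorem pvFd_bounds (a c : Int) (hc : 0 < c) (ha : 0 ≤ a) :
    0 ≤ PySem.Int.floordiv a c ∧ PySem.Int.floordiv a c * c ≤ a ∧ a < (PySem.Int.floordiv a c + 1) * c := by
  have h1 := (PySem.Int.floordiv_eq_iff_of_pos hc).mp (rfl : PySem.Int.floordiv a c = _)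
  refine ⟨?_, h1.1, h1.2⟩
  exact (PySem.Int.le_floordiv_iff_mul_le hc).mpr (by simpa using ha)

theorem pvG_replicate (c : Int) (hc : 1 ≤ c) (m : Nat) (rest : List Int) (rem : Int) :
    pvG (List.replicate m c ++ rest) rem =
      if PySem.Int.floordiv (max rem 0) c < (m : Int)
      then PySem.Int.floordiv (max rem 0) c
      else (m : Int) + pvG rest (rem - (m : Int) * c) := by
  induction m generalizing rem with
  | zero =>
    obtain ⟨hq0, -, -⟩ := pvFd_bounds (max rem 0) c (by omega) (le_max_right _ _)
    simp only [List.replicate_zero, List.nil_append, Nat.cast_zero]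
    rw [if_neg (by omega)]
    simp
  | succ m ih =>
    obtain ⟨hq0, hql, hqu⟩ := pvFd_bounds (max rem 0) c (by omega) (le_max_right _ _)
    set q := PySem.Int.floordiv (max rem 0) c with hq_def
    simp only [List.replicate_succ, List.cons_append, pvG]
    by_cases h : rem > 0
    · by_cases h2 : rem - c < 0
      · -- 0 ≤ rem < c  ⇒  floordiv = 0
        have hq : q = 0 := by
          rw [hq_def, PySem.Int.floordiv_eq_iff_of_pos (by omega)]
          constructor
          · simp only [zero_mul]; omega
          · simp only [zero_add, one_mul]; omega
        rw [if_pos h, if_pos h2, hq, if_pos (by positivity)]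
      · -- c ≤ rem : floordiv (rem - c) c = q - 1
        have hmx : max rem 0 = rem := by omega
        rw [hmx] at hql hqu
        have hmx2 : max (rem - c) 0 = rem - c := by omega
        have hq' : PySem.Int.floordiv (max (rem - c) 0) c = q - 1 := by
          rw [hmx2, PySem.Int.floordiv_eq_iff_of_pos (by omega)]
          have e1 : (q - 1) * c = q * c - c := by ring
          have e2 : (q - 1 + 1) * c = q * c := by ring
          have e3 : (q + 1) * c = q * c + c := by ring
          rw [e3] at hqu
          constructor
          · rw [e1]; omega
          · rw [e2]; omega
        rw [if_pos h, if_neg h2, ih, hq']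
        by_cases h3 : q < ((m + 1 : Nat) : Int)
        · rw [if_pos (by push_cast; push_cast at h3; omega), if_pos h3]; ring
        · rw [if_neg (by push_cast; push_cast at h3; omega), if_neg h3]
          have harg : rem - c - (m : Int) * c = rem - ((m + 1 : Nat) : Int) * c := by
            push_cast; ring
          rw [harg]; push_cast; ring
    · -- rem ≤ 0 ⇒ floordiv 0 c = 0 and pvG = 0
      have hq : q = 0 := by
        rw [hq_def, PySem.Int.floordiv_eq_iff_of_pos (by omega)]
        constructor
        · simp only [zero_mul]; omega
        · simp only [zero_add, one_mul]; omega
      rw [if_neg h, hq, if_pos (by positivity)]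

theorem pvBLoop_eq (B : PySem.Dict Int Int) (hB : ∀ c, 0 ≤ B.getD c 0)
    (cs : List Int) (hcs : ∀ c ∈ cs, 1 ≤ c) :
    ∀ removed rem, pvBLoop B cs removed rem
      = removed + pvG (cs.flatMap fun c => List.replicate (B.getD c 0).toNat c) rem := by
  induction cs with
  | nil => intro removed rem; simp [pvBLoop, pvG]
  | cons c cs' ih =>
    intro removed rem
    have hc : 1 ≤ c := hcs c (by simp)
    have hm0 : 0 ≤ B.getD c 0 := hB c
    rw [pvBLoop]
    simp only [List.flatMap_cons]
    by_cases hm : B.getD c 0 = 0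
    · rw [if_pos hm, ih (fun c hc => hcs c (by simp [hc]))]
      simp [hm]
    · rw [if_neg hm]
      have hcast : ((B.getD c 0).toNat : Int) = B.getD c 0 := Int.toNat_of_nonneg hm0
      rw [pvG_replicate c hc, hcast]
      obtain ⟨hq0, -, -⟩ := pvFd_bounds (max rem 0) c (by omega) (le_max_right _ _)
      by_cases h3 : PySem.Int.floordiv (max rem 0) c < B.getD c 0
      · rw [if_pos h3, if_pos (by omega), min_eq_right (le_of_lt h3)]
      · rw [if_neg h3, if_neg (by omega), ih (fun c hc => hcs c (by simp [hc]))]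
        ring

-- every frequency value lies in [1, len ids]
theorem pvVals_bounds (ids : List Int) :
    ∀ v ∈ (PySem.Dict.counter ids).values, 1 ≤ v ∧ v ≤ (ids.length : Int) := by
  intro v hv
  have : (PySem.Dict.counter ids).values
      = (PySem.Dict.counter ids).items.map Prod.snd := rfl
  rw [this, PySem.Dict.items_counter] at hv
  simp only [List.map_map, List.mem_map] at hv
  obtain ⟨k, hk, hkv⟩ := hv
  have hkmem : k ∈ ids := (PySem.Set.mem_ofList _ _).mp hk
  have h1 : 0 < ids.count k := List.count_pos_iff.mpr hkmem
  have h2 : ids.count k ≤ ids.length := List.count_le_length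
  simp only [Function.comp] at hkv
  omega

theorem pvCount_flat (cs : List Int) (f : Int → Nat) (hnd : cs.Nodup) (x : Int) :
    ((cs.flatMap fun c => List.replicate (f c) c).count x) = if x ∈ cs then f x else 0 := by
  induction cs with
  | nil => simp
  | cons c cs' ih =>
    have hnd' : cs'.Nodup := hnd.of_cons
    simp only [List.flatMap_cons, List.count_append, ih hnd', List.count_replicate]
    by_cases hx : x = c
    · subst hx
      have : x ∉ cs' := by
        intro hmem; exact (List.nodup_cons.mp hnd).1 hmem
      simp [this]
    · simp [hx, Ne.symm hx]

theorem pvFlat_pairwise (cs : List Int) (f : Int → Nat) (h : cs.Pairwise (· < ·)) :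
    (cs.flatMap fun c => List.replicate (f c) c).Pairwise (· ≤ ·) := by
  induction cs with
  | nil => simp
  | cons c cs' ih =>
    simp only [List.flatMap_cons]
    rw [List.pairwise_append]
    refine ⟨List.pairwise_replicate.mpr (by first | exact Or.inl le_rfl | exact Or.inr le_rfl), ih h.of_cons, ?_⟩
    intro a ha b hb
    have ha' : a = c := List.eq_of_mem_replicate ha
    obtain ⟨c', hc', hb'⟩ := List.mem_flatMap.mp hb
    have hb'' : b = c' := List.eq_of_mem_replicate hb'
    have : c < c' := (List.pairwise_cons.mp h).1 c' hc'
    omega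

-- the two greedy-consumed lists coincide: sorted-desc-reversed values = ascending bucket expansion
theorem pvLists_eq (ids : List Int) :
    ((PySem.List.sorted (PySem.Dict.counter ids).items (fun x => x.2) true).reverse.map Prod.snd)
      = (PySem.List.pyRange 1 ((ids.length : Int) + 1) 1).flatMap
          (fun c => List.replicate ((PySem.Dict.counter (PySem.Dict.counter ids).values).getD c 0).toNat c) := by
  have hvals := pvVals_bounds ids
  set vals := (PySem.Dict.counter ids).values with hv
  set L := ((PySem.List.sorted (PySem.Dict.counter ids).items (fun x => x.2) true).reverse.map Prod.snd) with hL
  set R := (PySem.List.pyRange 1 ((ids.length : Int) + 1) 1).flatMap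
      (fun c => List.replicate ((PySem.Dict.counter vals).getD c 0).toNat c) with hR
  have hLperm : L.Perm vals := by
    have h1 := PySem.List.sorted_perm (xs := (PySem.Dict.counter ids).items) (key := fun x => x.2) (rev := true)
    have h2 : vals = (PySem.Dict.counter ids).items.map Prod.snd := rfl
    rw [hL, h2]
    exact (((List.reverse_perm _).map Prod.snd).trans (h1.map Prod.snd))
  have hLsort : L.Pairwise (· ≤ ·) := by
    have h1 := PySem.List.sorted_pairwise_rev (xs := (PySem.Dict.counter ids).items) (key := fun x => x.2)
    rw [hL, List.pairwise_map]
    rw [List.pairwise_reverse]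
    exact h1.imp (fun h => h)
  have hRsort : R.Pairwise (· ≤ ·) :=
    pvFlat_pairwise _ _ (PySem.List.pairwise_lt_pyRange_one 1 ((ids.length : Int) + 1))
  have hRperm : R.Perm vals := by
    rw [List.perm_iff_count]
    intro x
    rw [hR, pvCount_flat _ _ (PySem.List.nodup_pyRange_one _ _) x]
    by_cases hx : x ∈ PySem.List.pyRange 1 ((ids.length : Int) + 1) 1
    · rw [if_pos hx, PySem.Dict.getD_counter]
      simp
    · rw [if_neg hx]
      have hxr : ¬ (1 ≤ x ∧ x < (ids.length : Int) + 1) := by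
        intro h; exact hx ((PySem.List.mem_pyRange_one).mpr h)
      have : x ∉ vals := by
        intro hmem
        have := hvals x hmem
        omega
      exact (List.count_eq_zero.mpr this).symm
  have : L.Perm R := hLperm.trans hRperm.symm
  exact this.eq_of_pairwise (fun a b _ _ h1 h2 => le_antisymm h1 h2) hLsort hRsort

-- ===== VERDICT (by name: the statement is the Claim_ definition above) =====
theorem removeProduct_spec : Claim_equal_removeProduct := by
  intro num ids rem hdom hpre
  unfold Spec_removeProduct removeProduct removeProduct_alt
  simp only [PySem.Dict.foldl_insert_getD_add_one_eq_counter]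
  rw [pvALoop_eq, pvBLoop_eq _ (fun c => by rw [PySem.Dict.getD_counter]; positivity)
      _ (fun c hc => ((PySem.List.mem_pyRange_one).mp hc).1)]
  rw [pvLists_eq ids]
  have hlen : (PySem.List.sorted (PySem.Dict.counter ids).items (fun x => x.2) true).length
      = (PySem.Dict.counter ids).items.length := PySem.List.length_sorted _ _ _
  have hsize : PySem.Dict.size (PySem.Dict.counter ids) = (PySem.Dict.counter ids).items.length := rfl
  rw [hlen, hsize]
  ring
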